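-- pv_equiv track=rewrite | github.com/waypope3/envchain | envchain/merger.py | merge_strict
-- ===== SOURCE A (Python) =====
-- from typing import Any, Dict, Callable
--
-- class MergeError(Exception):
--     def __init__(self, message: str):
--         super().__init__(message)
--         self.message = message
--
-- def merge_strict(base: Dict[str, Any], override: Dict[str, Any]) -> Dict[str, Any]:
--     """Raise MergeError if override tries to redefine an existing key."""
--     result = dict(base)
--     for key, value in override.items():
--         if key in result:
--             raise MergeError(
--                 f"Key '{key}' already defined in base layer and strict merge is active."
--             )
--         result[key] = value
--     return result
-- ===== SOURCE B (Python) =====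
-- class MergeError(Exception):
--     def __init__(self, message):
--         super().__init__(message)
--         self.message = message
--
-- def merge_strict(base, override):
--     """Recursive strict merge: attach(i) builds the dict of override items from i on,
--     checking each key against base before recursing; the result is base extended with it."""
--     items = list(override.items())
--
--     def attach(i):
--         if i == len(items):
--             return {}
--         key, value = items[i]
--         if key in base:
--             raise MergeError(
--                 f"Key '{key}' already defined in base layer and strict merge is active."
--             )
--         return {key: value, **attach(i + 1)}
--
--     return {**base, **attach(0)}
-- ===== Notes on version B (the rewrite author's own statement) =====
-- stated objective: alternative
-- what changed: Replaces A's iterative copy-and-insert loop by a recursive decomposition: attach(i) recursively builds the dict of override items from index i onward (checking each key against base, not the growing result), and the answer is base spliced with that recursively built suffix.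
import Mathlib
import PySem

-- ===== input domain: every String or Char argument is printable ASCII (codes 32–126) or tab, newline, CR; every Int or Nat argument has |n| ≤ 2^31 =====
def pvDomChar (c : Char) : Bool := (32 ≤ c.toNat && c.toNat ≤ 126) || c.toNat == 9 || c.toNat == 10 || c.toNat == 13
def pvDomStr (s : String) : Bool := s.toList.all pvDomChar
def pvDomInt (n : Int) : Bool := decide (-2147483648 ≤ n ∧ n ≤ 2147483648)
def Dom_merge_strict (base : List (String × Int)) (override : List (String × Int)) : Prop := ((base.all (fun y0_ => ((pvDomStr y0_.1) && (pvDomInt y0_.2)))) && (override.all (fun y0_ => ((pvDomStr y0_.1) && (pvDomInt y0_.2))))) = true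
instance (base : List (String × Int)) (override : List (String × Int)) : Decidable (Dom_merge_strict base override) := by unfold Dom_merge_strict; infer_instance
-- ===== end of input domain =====

-- B replaces A's iterative copy-and-insert loop by a recursive decomposition (attach builds the override suffix dict, checking keys against base); equivalence of the RETURN value is proved on inputs where A does not raise MergeError.


-- ===== PORT A =====
-- result = dict(base); for key, value in override.items(): if key in result: raise MergeError(...) else result[key] = value; return result
-- 'none' in the fold is exactly the raised MergeError; the inputs reaching it are excluded by Pre_merge_strict,
-- so the final '.getD []' is never consulted on admitted inputs.
def merge_strict (base : List (String × Int)) (override : List (String × Int)) : List (String × Int) :=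
  (((PySem.Dict.ofList override).items.foldl
      (fun acc p => acc.bind (fun d => if d.contains p.1 = true then none else some (d.insert p.1 p.2)))
      (some (PySem.Dict.ofList base))).map PySem.Dict.items).getD []

-- ===== PORT B =====
-- def attach(i): if i == len(items): return {}; key, value = items[i]; if key in base: raise MergeError(...); return {key: value, **attach(i+1)}
-- ported as structural recursion on the suffix items[i:]; 'none' is the raised MergeError (excluded by Pre_merge_strict).
def mergeAttach (base : PySem.Dict String Int) : List (String × Int) → Option (PySem.Dict String Int)
  | [] => some PySem.Dict.empty
  | (k, v) :: rest =>
    if base.contains k = true then none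
    else (mergeAttach base rest).map (fun t => (PySem.Dict.empty.insert k v).update t.items)

-- return {**base, **attach(0)}
def merge_strict_alt (base : List (String × Int)) (override : List (String × Int)) : List (String × Int) :=
  match mergeAttach (PySem.Dict.ofList base) (PySem.Dict.ofList override).items with
  | none => []
  | some t => ((PySem.Dict.ofList base).update t.items).items

-- ===== PRECONDITION & SPEC =====
-- Pre_ excludes exactly the inputs on which A raises MergeError: some override key already present in base.
def Pre_merge_strict (base : List (String × Int)) (override : List (String × Int)) : Prop :=
  ∀ p ∈ override, ∀ q ∈ base, p.1 ≠ q.1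
instance (base : List (String × Int)) (override : List (String × Int)) : Decidable (Pre_merge_strict base override) := by unfold Pre_merge_strict; infer_instance
def pvWitness_merge_strict : (List (String × Int)) × (List (String × Int)) :=
  ([("HOME", 1), ("PATH", 2)], [("USER", 3)])

def Spec_merge_strict (base : List (String × Int)) (override : List (String × Int)) (out : List (String × Int)) : Prop := out = merge_strict_alt base override
instance (base : List (String × Int)) (override : List (String × Int)) (out : List (String × Int)) : Decidable (Spec_merge_strict base override out) := by unfold Spec_merge_strict; infer_instance

-- ===== CLAIM (what is proved, stated in full; the proofs are below) =====
def Claim_equal_merge_strict : Prop := ∀ (base : List (String × Int)) (override : List (String × Int)), Dom_merge_strict base override → Pre_merge_strict base override → Spec_merge_strict base override (merge_strict base override)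

-- ===== LEMMAS AND PROOFS =====

-- keys of an ofList dict are the first components of the list
theorem mem_keys_ofList_iff (l : List (String × Int)) (k : String) :
    k ∈ (PySem.Dict.ofList l).keys ↔ k ∈ l.map Prod.fst := by
  have h := PySem.Dict.keys_foldl_insert_key (ν := Int) l Prod.fst (fun _ p => p.2) PySem.Dict.empty
  have hof : (PySem.Dict.ofList l).keys
      = (List.foldl (fun d x => d.insert (Prod.fst x) ((fun (_ : PySem.Dict String Int) (p : String × Int) => p.2) d x)) PySem.Dict.empty l).keys := rfl
  rw [hof, h, PySem.Dict.keys_empty]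
  rw [PySem.Set.mem_update]
  simp

-- a list with distinct keys is its own dict's items list
theorem items_ofList_of_nodup (l : List (String × Int)) (hnd : (l.map Prod.fst).Nodup) :
    (PySem.Dict.ofList l).items = l := by
  have h := PySem.Dict.items_foldl_insert_fresh l Prod.fst Prod.snd PySem.Dict.empty
      (fun a _ => PySem.Dict.contains_empty a.1) hnd
  have hof : (PySem.Dict.ofList l).items
      = (List.foldl (fun d a => d.insert (Prod.fst a) (Prod.snd a)) PySem.Dict.empty l).items := rfl
  rw [hof, h]
  simp [PySem.Dict.empty]

-- A's raise-or-insert loop never raises when every key is fresh and keys are distinct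
theorem foldA (l : List (String × Int)) (d : PySem.Dict String Int)
    (hfresh : ∀ p ∈ l, d.contains p.1 = false) (hnd : (l.map Prod.fst).Nodup) :
    l.foldl (fun acc p => acc.bind (fun d => if d.contains p.1 = true then none else some (d.insert p.1 p.2))) (some d)
      = some (l.foldl (fun d p => d.insert p.1 p.2) d) := by
  induction l generalizing d with
  | nil => rfl
  | cons p t ih =>
    have hp : d.contains p.1 = false := hfresh p (by simp)
    have hstep : ((some d).bind (fun d => if d.contains p.1 = true then none else some (d.insert p.1 p.2))) = some (d.insert p.1 p.2) := by
      show (if d.contains p.1 = true then none else some (d.insert p.1 p.2)) = _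
      rw [hp]; simp
    simp only [List.foldl_cons, hstep]
    rw [List.map_cons, List.nodup_cons] at hnd
    apply ih
    · intro q hq
      rw [PySem.Dict.contains_insert]
      have hne : q.1 ≠ p.1 := by
        intro h; exact hnd.1 (h ▸ List.mem_map_of_mem hq)
      simp [hne, hfresh q (List.mem_cons_of_mem _ hq)]
    · exact hnd.2

-- updating a concatenated dict with keys fresh for the left part acts on the right part only
theorem updateSeg (l : List (String × Int)) (d e : PySem.Dict String Int)
    (hfresh : ∀ p ∈ l, d.contains p.1 = false) :
    (PySem.Dict.mk (d.items ++ e.items)).update l = PySem.Dict.mk (d.items ++ (e.update l).items) := by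
  induction l generalizing e with
  | nil => rfl
  | cons p t ih =>
    have hd : d.contains p.1 = false := hfresh p (by simp)
    have hdany : d.items.any (fun q => q.1 == p.1) = false := hd
    have hstep : (PySem.Dict.mk (d.items ++ e.items)).insert p.1 p.2
        = PySem.Dict.mk (d.items ++ (e.insert p.1 p.2).items) := by
      by_cases he : e.contains p.1 = true
      · have hc : (PySem.Dict.mk (d.items ++ e.items)).contains p.1 = true := by
          simp only [PySem.Dict.contains] at he ⊢
          simp [List.any_append, he]
        have hne : ∀ q ∈ d.items, q.1 ≠ p.1 := by
          intro q hq
          have := List.any_eq_false.mp hdany q hq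
          simpa using this
        simp only [PySem.Dict.insert, hc, he, if_true]
        simp only [List.map_append]
        have hmapd : d.items.map (fun q => if q.1 = p.1 then (p.1, p.2) else q) = d.items :=
          (List.map_congr_left (fun q hq => by simp [hne q hq])).trans (List.map_id _)
        simp [hmapd]
      · have he' : e.contains p.1 = false := by simpa using he
        have hc : (PySem.Dict.mk (d.items ++ e.items)).contains p.1 = false := by
          simp only [PySem.Dict.contains] at he' ⊢
          simp only [List.any_append, Bool.or_eq_false_iff]
          refine ⟨?_, ?_⟩
          · apply List.any_eq_false.mpr; intro q hq
            have := List.any_eq_false.mp hdany q hq; simpa using this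
          · apply List.any_eq_false.mpr; intro q hq
            have := List.any_eq_false.mp he' q hq; simpa using this
        simp only [PySem.Dict.insert, hc, he', Bool.false_eq_true, if_false]
        simp [List.append_assoc]
    show ((PySem.Dict.mk (d.items ++ e.items)).insert p.1 p.2).update t = _
    rw [hstep]
    exact ih (e.insert p.1 p.2) (fun q hq => hfresh q (List.mem_cons_of_mem _ hq))

theorem update_items_of_fresh (base : PySem.Dict String Int) (l : List (String × Int))
    (hfresh : ∀ p ∈ l, base.contains p.1 = false) :
    (base.update l).items = base.items ++ (PySem.Dict.ofList l).items := by
  have h := updateSeg l base PySem.Dict.empty hfresh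
  have h1 : PySem.Dict.mk (base.items ++ PySem.Dict.empty.items) = base := by
    apply PySem.Dict.ext; simp [PySem.Dict.empty]
  rw [h1] at h
  have h2 : PySem.Dict.empty.update l = PySem.Dict.ofList l := rfl
  rw [h2] at h
  rw [h]

-- B's recursion returns the dict of its argument list when keys are fresh and distinct
theorem attach_eq (base : PySem.Dict String Int) (l : List (String × Int))
    (hfresh : ∀ p ∈ l, base.contains p.1 = false) (hnd : (l.map Prod.fst).Nodup) :
    mergeAttach base l = some (PySem.Dict.mk l) := by
  induction l with
  | nil => rfl
  | cons p t ih =>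
    obtain ⟨k, v⟩ := p
    rw [List.map_cons, List.nodup_cons] at hnd
    have hk : base.contains k = false := hfresh (k, v) (by simp)
    have hrec := ih (fun q hq => hfresh q (List.mem_cons_of_mem _ hq)) hnd.2
    show (if base.contains k = true then none else
      (mergeAttach base t).map (fun t => (PySem.Dict.empty.insert k v).update t.items)) = _
    rw [hk, hrec]
    simp only [Bool.false_eq_true, if_false, Option.map_some, Option.some.injEq]
    -- (empty.insert k v).update t = mk ((k,v) :: t)
    have hkv : (PySem.Dict.empty.insert k v) = PySem.Dict.mk [(k, v)] := by
      apply PySem.Dict.ext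
      simp [PySem.Dict.insert, PySem.Dict.contains, PySem.Dict.empty]
    have hfreshk : ∀ q ∈ (PySem.Dict.mk t).items, (PySem.Dict.mk [(k, v)]).contains q.1 = false := by
      intro q hq
      have hq' : q ∈ t := hq
      have hne : q.1 ≠ k := fun h => hnd.1 (List.mem_map.mpr ⟨q, hq', h⟩)
      simp [PySem.Dict.contains, Ne.symm hne]
    have h := updateSeg (PySem.Dict.mk t).items (PySem.Dict.mk [(k, v)]) PySem.Dict.empty hfreshk
    have h1 : PySem.Dict.mk ((PySem.Dict.mk [(k, v)]).items ++ PySem.Dict.empty.items)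
        = PySem.Dict.mk [(k, v)] := by
      apply PySem.Dict.ext; simp [PySem.Dict.empty]
    rw [h1] at h
    have h2 : PySem.Dict.empty.update (PySem.Dict.mk t).items
        = PySem.Dict.ofList (PySem.Dict.mk t).items := rfl
    have h3 : (PySem.Dict.mk t).items = t := rfl
    rw [hkv, h3] at *
    rw [h, h2, h3, items_ofList_of_nodup t hnd.2]
    rfl

-- ===== VERDICT (by name: the statement is the Claim_ definition above) =====
theorem merge_strict_spec : Claim_equal_merge_strict := by
  intro base override _hdom hpre
  unfold Spec_merge_strict
  have hnotin : ∀ k, k ∈ override.map Prod.fst → (PySem.Dict.ofList base).contains k = false := by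
    intro k hk
    rcases List.mem_map.mp hk with ⟨p, hp, rfl⟩
    rw [← Bool.not_eq_true, PySem.Dict.contains_iff_mem_keys]
    intro hmem
    rcases List.mem_map.mp ((mem_keys_ofList_iff base p.1).mp hmem) with ⟨q, hq, hq1⟩
    exact hpre p hp q hq hq1.symm
  have hfreshA : ∀ p ∈ (PySem.Dict.ofList override).items,
      (PySem.Dict.ofList base).contains p.1 = false := by
    intro p hp
    have : p.1 ∈ (PySem.Dict.ofList override).keys := PySem.Dict.mem_keys_of_mem_items _ hp
    exact hnotin p.1 ((mem_keys_ofList_iff override p.1).mp this)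
  have hndA : ((PySem.Dict.ofList override).items.map Prod.fst).Nodup := by
    have := PySem.Dict.nodup_keys_ofList (ν := Int) override
    simpa [PySem.Dict.keys] using this
  unfold merge_strict merge_strict_alt
  rw [foldA _ _ hfreshA hndA, attach_eq _ _ hfreshA hndA]
  simp only [Option.map_some, Option.getD_some]
  have hitems := PySem.Dict.items_foldl_insert_fresh (PySem.Dict.ofList override).items
      Prod.fst Prod.snd (PySem.Dict.ofList base) hfreshA hndA
  have hfold : ((PySem.Dict.ofList override).items.foldl (fun d p => d.insert p.1 p.2)
      (PySem.Dict.ofList base)).items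
      = (PySem.Dict.ofList base).items ++ (PySem.Dict.ofList override).items := by
    rw [show ((PySem.Dict.ofList override).items.foldl (fun d p => d.insert p.1 p.2)
        (PySem.Dict.ofList base))
      = ((PySem.Dict.ofList override).items.foldl (fun d p => d.insert (Prod.fst p) (Prod.snd p))
        (PySem.Dict.ofList base)) from rfl]
    rw [hitems]
    simp
  rw [hfold]
  have hBitems : (PySem.Dict.mk (PySem.Dict.ofList override).items).items
      = (PySem.Dict.ofList override).items := rfl
  rw [update_items_of_fresh _ _ (by rw [hBitems] at *; exact fun p hp => hfreshA p hp),
      hBitems, items_ofList_of_nodup _ hndA]
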